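-- pv_equiv track=rewrite | github.com/ByunDohwi/BAEKJOON | 프로그래머스/2/468379. 선인장 숨기기/선인장 숨기기.py | solution
-- ===== SOURCE A (Python) =====
-- from collections import deque
--
-- def solution(m, n, h, w, drops):
--     INF = len(drops) + 1
--
--     rains = [[INF] * n for _ in range(m)]
--     for t, (r, c) in enumerate(drops, start=1):
--         rains[r][c] = t
--
--     width_cnt = n - w + 1
--     row_min = [[0] * width_cnt for _ in range(m)]
--
--     for i in range(m):
--         dq = deque()
--         for j in range(n):
--             while dq and rains[i][dq[-1]] >= rains[i][j]:
--                 dq.pop()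
--             dq.append(j)
--
--             if dq[0] <= j - w:
--                 dq.popleft()
--
--             if j >= w - 1:
--                 row_min[i][j - w + 1] = rains[i][dq[0]]
--
--     best_val = -1
--     answer = [10**9, 10**9]
--
--     for j in range(width_cnt):
--         dq = deque()
--         for i in range(m):
--             while dq and row_min[dq[-1]][j] >= row_min[i][j]:
--                 dq.pop()
--             dq.append(i)
--
--             if dq[0] <= i - h:
--                 dq.popleft()
--
--             if i >= h - 1:
--                 top = i - h + 1
--                 val = row_min[dq[0]][j]
--
--                 if val > best_val or (val == best_val and [top, j] < answer):
--                     best_val = val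
--                     answer = [top, j]
--
--     return answer
-- ===== SOURCE B (Python) =====
-- def solution(m, n, h, w, drops):
--     INF = len(drops) + 1
--
--     rains = [[INF] * n for _ in range(m)]
--     for t, (r, c) in enumerate(drops, start=1):
--         rains[r][c] = t
--
--     best_val = -1
--     answer = [10**9, 10**9]
--
--     for left in range(n - w + 1):
--         for top in range(m - h + 1):
--             val = min(rains[i][k] for i in range(top, top + h)
--                                   for k in range(left, left + w))
--             if val > best_val or (val == best_val and [top, left] < answer):
--                 best_val = val
--                 answer = [top, left]
--
--     return answer
-- ===== Notes on version B (the rewrite author's own statement) =====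
-- stated objective: simpler
-- what changed: Replaces the two monotonic-deque sliding-window-minimum passes and the in-place row_min grid with a direct scan that computes each window's minimum as one flat min over its h*w cells and updates the best (value, position) pair in the same order as A.
-- outside the precondition, e.g. on solution(1, 0, 1, 0, []): A returns [0, 0], B raises ValueError; on solution(0, 3, 0, 1, []): A returns [1000000000, 1000000000], B raises ValueError
import Mathlib
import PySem

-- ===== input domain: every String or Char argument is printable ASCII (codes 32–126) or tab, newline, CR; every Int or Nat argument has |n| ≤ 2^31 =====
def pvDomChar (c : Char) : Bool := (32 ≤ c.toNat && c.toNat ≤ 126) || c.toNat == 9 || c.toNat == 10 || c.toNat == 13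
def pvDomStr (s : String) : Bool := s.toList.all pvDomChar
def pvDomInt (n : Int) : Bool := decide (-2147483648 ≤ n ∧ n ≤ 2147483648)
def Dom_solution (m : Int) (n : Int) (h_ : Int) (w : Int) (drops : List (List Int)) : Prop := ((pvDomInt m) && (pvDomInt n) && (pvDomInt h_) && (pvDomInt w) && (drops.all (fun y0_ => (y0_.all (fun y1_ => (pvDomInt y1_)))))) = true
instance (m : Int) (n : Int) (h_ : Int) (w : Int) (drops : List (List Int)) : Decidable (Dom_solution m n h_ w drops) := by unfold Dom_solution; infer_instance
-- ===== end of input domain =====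

-- B replaces A's two monotonic-deque sliding-window-minimum passes by a direct scan computing
-- each window's minimum as one flat min over its h*w cells (simpler, not faster); same scan
-- order and tie-breaking, so the returned [top, left] pair is identical.

-- ===== shared helpers (code both Pythons contain verbatim: grid building and the best-pair update) =====

-- Python `xs[i] = v` for -len(xs) ≤ i < len(xs) (exact there; Pre_ excludes the raising drops)
def pySetIdx (xs : List Int) (i v : Int) : List Int :=
  let k := if i < 0 then i + (xs.length : Int) else i
  xs.set k.toNat v

-- Python `g[r][c] = v` (same index convention)
def pySet2 (g : List (List Int)) (r c v : Int) : List (List Int) :=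
  let k := (if r < 0 then r + (g.length : Int) else r).toNat
  g.set k (pySetIdx (g.getD k []) c v)

-- rains = [[INF]*n for _ in range(m)]; for t,(r,c) in enumerate(drops,1): rains[r][c] = t
def buildRains (m n : Int) (drops : List (List Int)) : List (List Int) :=
  let inf : Int := (drops.length : Int) + 1
  (PySem.List.enumerate drops 1).foldl
    (fun g td => match td.2 with
      | [r, c] => pySet2 g r c td.1
      | _ => g)   -- a drop that is not a pair raises ValueError in Python; excluded by Pre_
    ((PySem.List.pyRange 0 m 1).map (fun _ => (PySem.List.pyRange 0 n 1).map (fun _ => inf)))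

-- read g[i][k] for indices that are in range and nonnegative at every use site
def cell (g : List (List Int)) (i k : Int) : Int := (g.getD i.toNat []).getD k.toNat 0

-- Python `[top, j] < answer` (lexicographic list comparison on Int lists)
def listLt : List Int → List Int → Bool
  | _, [] => false
  | [], _ :: _ => true
  | x :: xs, y :: ys => if x < y then true else if x = y then listLt xs ys else false

-- if val > best_val or (val == best_val and [top, j] < answer): best_val, answer = val, [top, j]
def upd (st : Int × List Int) (v top j : Int) : Int × List Int :=
  if v > st.1 || (v == st.1 && listLt [top, j] st.2) then (v, [top, j]) else st

-- ===== PORT A =====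

-- while dq and a(dq[-1]) >= a(j): dq.pop()   (structural recursion from the left over the deque)
def popWhileBack (p : Int → Bool) : List Int → List Int
  | [] => []
  | x :: xs =>
      let r := popWhileBack p xs
      if r.isEmpty then (if p x then [] else [x]) else x :: r

-- one body of A's deque loop: pop-from-right, append j, pop-from-left if the window slid past
def dqStep (v : Int → Int) (wnd j : Int) (dq : List Int) : List Int :=
  let dq1 := popWhileBack (fun k => v j ≤ v k) dq ++ [j]
  if dq1.headD 0 ≤ j - wnd then dq1.tail else dq1

def solution (m : Int) (n : Int) (h_ : Int) (w : Int) (drops : List (List Int)) : List Int :=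
  let rains := buildRains m n drops
  let widthCnt := n - w + 1
  let rowPass : Int → List Int := fun i =>
    let a := fun k => cell rains i k
    ((PySem.List.pyRange 0 n 1).foldl
      (fun (st : List Int × List Int) j =>
        let dq := dqStep a w j st.1
        let row := if w - 1 ≤ j then pySetIdx st.2 (j - w + 1) (a (dq.headD 0)) else st.2
        (dq, row))
      ([], (PySem.List.pyRange 0 widthCnt 1).map (fun _ => 0))).2
  let rowMin := (PySem.List.pyRange 0 m 1).map rowPass
  ((PySem.List.pyRange 0 widthCnt 1).foldl
    (fun (st : Int × List Int) j =>
      ((PySem.List.pyRange 0 m 1).foldl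
        (fun (st2 : List Int × Int × List Int) i =>
          let dq := dqStep (fun i' => cell rowMin i' j) h_ i st2.1
          if h_ - 1 ≤ i then
            (dq, upd st2.2 (cell rowMin (dq.headD 0) j) (i - h_ + 1) j)
          else (dq, st2.2))
        ([], st)).2)
    (-1, [1000000000, 1000000000])).2

-- ===== PORT B =====

-- Python min() of a nonempty sequence (the running-min loop); never called on [] inside Pre_
def minList : List Int → Int
  | [] => 0
  | x :: xs => xs.foldl min x

def solution_alt (m : Int) (n : Int) (h_ : Int) (w : Int) (drops : List (List Int)) : List Int :=
  let rains := buildRains m n drops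
  ((PySem.List.pyRange 0 (n - w + 1) 1).foldl
    (fun (st : Int × List Int) left =>
      (PySem.List.pyRange 0 (m - h_ + 1) 1).foldl
        (fun st2 top =>
          let v := minList ((PySem.List.pyRange top (top + h_) 1).flatMap
                     (fun i => (PySem.List.pyRange left (left + w) 1).map (fun k => cell rains i k)))
          upd st2 v top left)
        st)
    (-1, [1000000000, 1000000000])).2

-- ===== PRECONDITION & SPEC =====
-- Pre_ admits the natural domain (positive window sizes, drops that Python can unpack and
-- index without raising) plus the degenerate grids on which both programs return the untouched
-- default. It excludes inputs on which Python A raises (malformed or out-of-range drops;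
-- nonpositive h or w on a grid whose loops run, giving IndexError) and the nonpositive-h/w
-- corners where A returns a value read from the never-written 0-initialized row_min grid or the
-- default while B's min() over an empty window raises ValueError.
def Pre_solution (m : Int) (n : Int) (h_ : Int) (w : Int) (drops : List (List Int)) : Prop :=
  (∀ d ∈ drops, d.length = 2 ∧
    -m ≤ d.getD 0 0 ∧ d.getD 0 0 < m ∧ -n ≤ d.getD 1 0 ∧ d.getD 1 0 < n) ∧
  ((0 ≤ m ∧ 0 ≤ n ∧ 1 ≤ h_ ∧ 1 ≤ w) ∨ (m ≤ 0 ∧ m < h_) ∨ (n < w ∧ 1 ≤ w))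

instance (m : Int) (n : Int) (h_ : Int) (w : Int) (drops : List (List Int)) : Decidable (Pre_solution m n h_ w drops) := by unfold Pre_solution; infer_instance

def pvWitness_solution : Int × Int × Int × Int × List (List Int) := (2, 3, 1, 2, [[0, 0], [1, 2]])

def Spec_solution (m : Int) (n : Int) (h_ : Int) (w : Int) (drops : List (List Int)) (out : List Int) : Prop := out = solution_alt m n h_ w drops
instance (m : Int) (n : Int) (h_ : Int) (w : Int) (drops : List (List Int)) (out : List Int) : Decidable (Spec_solution m n h_ w drops out) := by unfold Spec_solution; infer_instance

-- ===== CLAIM (what is proved, stated in full; the proofs are below) =====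
def Claim_equal_solution : Prop := ∀ (m : Int) (n : Int) (h_ : Int) (w : Int) (drops : List (List Int)), Dom_solution m n h_ w drops → Pre_solution m n h_ w drops → Spec_solution m n h_ w drops (solution m n h_ w drops)


-- ===== LEMMAS AND PROOFS =====

-- ---- minList facts ----

theorem minList_spec (l : List Int) (hl : l ≠ []) : minList l ∈ l ∧ ∀ x ∈ l, minList l ≤ x := by
  match l, hl with
  | x :: xs, _ =>
    have hle := PySem.List.foldl_min_le xs x
    have hmem := PySem.List.foldl_min_mem xs x
    constructor
    · simp only [minList]
      rcases hmem with h | h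
      · simp [h]
      · simp [h]
    · intro y hy
      simp only [minList]
      rcases List.mem_cons.mp hy with rfl | hy
      · exact hle.1
      · exact hle.2 y hy

theorem minList_eq_of (l : List Int) (x : Int) (hx : x ∈ l) (hall : ∀ y ∈ l, x ≤ y) :
    minList l = x := by
  have hne : l ≠ [] := List.ne_nil_of_mem hx
  have hs := minList_spec l hne
  exact le_antisymm (hs.2 x hx) (hall _ hs.1)

theorem minList_append (xs ys : List Int) (hx : xs ≠ []) (hy : ys ≠ []) :
    minList (xs ++ ys) = min (minList xs) (minList ys) := by
  have hxs := minList_spec xs hx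
  have hys := minList_spec ys hy
  apply minList_eq_of
  · rcases le_total (minList xs) (minList ys) with h | h
    · rw [min_eq_left h]; exact List.mem_append_left _ hxs.1
    · rw [min_eq_right h]; exact List.mem_append_right _ hys.1
  · intro y hy'
    rcases List.mem_append.mp hy' with h | h
    · exact le_trans (min_le_left _ _) (hxs.2 y h)
    · exact le_trans (min_le_right _ _) (hys.2 y h)

theorem minList_flatMap {α : Type} (l : List α) (f : α → List Int)
    (hl : l ≠ []) (hf : ∀ x ∈ l, f x ≠ []) :
    minList (l.flatMap f) = minList (l.map (fun x => minList (f x))) := by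
  induction l with
  | nil => cases hl rfl
  | cons x xs ih =>
    cases xs with
    | nil =>
      show minList (f x ++ []) = minList [minList (f x)]
      simp only [List.append_nil]
      rfl
    | cons y ys =>
      have hxs : (y :: ys) ≠ [] := by simp
      have hfx : f x ≠ [] := hf x (List.mem_cons_self)
      have hflat : (y :: ys).flatMap f ≠ [] := by
        have : f y ≠ [] := hf y (by simp)
        simp only [List.flatMap_cons]
        intro h
        exact this (List.append_eq_nil_iff.mp h).1
      have hmapne : ((y :: ys).map (fun x => minList (f x))) ≠ [] := by simp
      have ih' := ih hxs (fun z hz => hf z (List.mem_cons_of_mem _ hz))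
      rw [List.flatMap_cons, minList_append _ _ hfx hflat, ih']
      have hsplit : minList (List.map (fun x => minList (f x)) (x :: y :: ys))
          = min (minList (f x)) (minList (List.map (fun x => minList (f x)) (y :: ys))) := by
        rw [show List.map (fun x => minList (f x)) (x :: y :: ys)
              = [minList (f x)] ++ List.map (fun x => minList (f x)) (y :: ys) from rfl,
          minList_append _ _ (by simp) hmapne]
        rfl
      rw [hsplit]

-- ---- the monotone deque: popWhileBack is a filter on value-monotone deques ----

theorem popWhileBack_eq_filter (p : Int → Bool) :
    ∀ l : List Int, l.Pairwise (fun a b => p a = true → p b = true) →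
      popWhileBack p l = l.filter (fun x => !p x) := by
  intro l
  induction l with
  | nil => intro _; rfl
  | cons x xs ih =>
    intro hp
    rw [List.pairwise_cons] at hp
    have ihx := ih hp.2
    by_cases hx : p x = true
    · have hempty : xs.filter (fun x => !p x) = [] :=
        List.filter_eq_nil_iff.mpr (fun a ha => by simp [hp.1 a ha hx])
      simp [popWhileBack, ihx, hempty, hx]
    · cases hfe : xs.filter (fun x => !p x) with
      | nil => simp [popWhileBack, ihx, hfe, hx]
      | cons z zs => simp [popWhileBack, ihx, hfe, hx]

-- ---- the candidate list: A's deque contents in closed form ----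

-- k survives up to j iff every later index in (k, j] has a strictly larger value
def good (v : Int → Int) (j k : Int) : Bool :=
  (PySem.List.pyRange (k + 1) (j + 1) 1).all (fun k' => v k < v k')

def cand (v : Int → Int) (W j : Int) : List Int :=
  (PySem.List.pyRange (max 0 (j - W + 1)) (j + 1) 1).filter (good v j)

theorem good_iff (v : Int → Int) (j k : Int) :
    good v j k = true ↔ ∀ k', k < k' → k' ≤ j → v k < v k' := by
  simp only [good, List.all_eq_true, PySem.List.mem_pyRange_one, decide_eq_true_eq]
  constructor
  · intro h k' h1 h2; exact h k' ⟨by omega, by omega⟩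
  · intro h k' hk'; exact h k' (by omega) (by omega)

theorem mem_cand (v : Int → Int) (W j k : Int) :
    k ∈ cand v W j ↔ (max 0 (j - W + 1) ≤ k ∧ k ≤ j ∧ good v j k = true) := by
  simp only [cand, List.mem_filter, PySem.List.mem_pyRange_one]
  constructor
  · rintro ⟨⟨h1, h2⟩, h3⟩; exact ⟨h1, by omega, h3⟩
  · rintro ⟨h1, h2, h3⟩; exact ⟨⟨h1, by omega⟩, h3⟩

theorem pairwise_lt_cand (v : Int → Int) (W j : Int) :
    (cand v W j).Pairwise (· < ·) :=
  (PySem.List.pairwise_lt_pyRange_one _ _).filter _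

theorem pairwise_val_lt_cand (v : Int → Int) (W j : Int) :
    (cand v W j).Pairwise (fun a b => v a < v b) := by
  refine List.Pairwise.imp_of_mem ?_ (pairwise_lt_cand v W j)
  intro a b ha hb hab
  have hga := (mem_cand v W j a).mp ha
  have hgb := (mem_cand v W j b).mp hb
  exact (good_iff v j a).mp hga.2.2 b hab hgb.2.1

theorem good_self (v : Int → Int) (L : Int) : good v L L = true := by
  unfold good
  rw [PySem.List.pyRange_one_eq_nil (le_refl (L + 1))]
  rfl

theorem mem_cand_self (v : Int → Int) (W j : Int) (hW : 1 ≤ W) (hj : 0 ≤ j) :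
    j ∈ cand v W j := by
  rw [mem_cand]
  exact ⟨by omega, le_refl _, good_self v j⟩

theorem cand_ne_nil (v : Int → Int) (W j : Int) (hW : 1 ≤ W) (hj : 0 ≤ j) :
    cand v W j ≠ [] :=
  List.ne_nil_of_mem (mem_cand_self v W j hW hj)

theorem headD_mem {l : List Int} (h : l ≠ []) : l.headD 0 ∈ l := by
  cases l with
  | nil => exact absurd rfl h
  | cons x xs => simp

theorem good_succ (v : Int → Int) (j k : Int) (hk : k < j) :
    good v j k = (good v (j - 1) k && decide (v k < v j)) := by
  unfold good
  rw [show j - 1 + 1 = j from by ring,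
    PySem.List.pyRange_one_succ_right (show k + 1 ≤ j from by omega), List.all_append]
  simp

theorem dqStep_cand (v : Int → Int) (W L : Int) (hW : 1 ≤ W) (hL : 0 ≤ L) :
    dqStep v W L (cand v W (L - 1)) = cand v W L := by
  have hpair : (cand v W (L - 1)).Pairwise
      (fun a b => (decide (v L ≤ v a)) = true → (decide (v L ≤ v b)) = true) := by
    refine List.Pairwise.imp_of_mem ?_ (pairwise_val_lt_cand v W (L - 1))
    intro a b _ _ hab
    simp only [decide_eq_true_eq]
    intro hvL
    exact le_trans hvL (le_of_lt hab)
  have hpop := popWhileBack_eq_filter (fun k => decide (v L ≤ v k)) _ hpair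
  have hfilter : (cand v W (L - 1)).filter (fun k => !decide (v L ≤ v k)) ++ [L]
      = (PySem.List.pyRange (max 0 (L - W)) (L + 1) 1).filter (good v L) := by
    unfold cand
    rw [show L - 1 - W + 1 = L - W from by ring, show L - 1 + 1 = L from by ring,
      List.filter_filter,
      PySem.List.pyRange_one_succ_right (show max 0 (L - W) ≤ L from by omega),
      List.filter_append]
    congr 1
    · apply List.filter_congr
      intro k hk
      rw [PySem.List.mem_pyRange_one] at hk
      show (!decide (v L ≤ v k) && good v (L - 1) k) = good v L k
      rw [good_succ v L k (by omega), Bool.and_comm]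
      congr 1
      rw [← decide_not]
      exact decide_eq_decide.mpr not_le
    · simp [good_self v L]
  have hstep : dqStep v W L (cand v W (L - 1))
      = (let dq1 := (PySem.List.pyRange (max 0 (L - W)) (L + 1) 1).filter (good v L);
         if dq1.headD 0 ≤ L - W then dq1.tail else dq1) := by
    simp only [dqStep, hpop, hfilter]
  rw [hstep]
  simp only []
  by_cases hcase : 0 ≤ L - W
  · have hlo : max 0 (L - W + 1) = L - W + 1 := by omega
    rw [show max 0 (L - W) = L - W from by omega,
      PySem.List.pyRange_one_cons (show L - W < L + 1 from by omega), List.filter_cons]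
    have hcand : cand v W L = (PySem.List.pyRange (L - W + 1) (L + 1) 1).filter (good v L) := by
      unfold cand; rw [hlo]
    by_cases hg : good v L (L - W) = true
    · rw [if_pos hg]
      simp only [List.headD_cons]
      rw [if_pos (le_refl _), List.tail_cons, ← hcand]
    · rw [if_neg hg, ← hcand]
      have hne := cand_ne_nil v W L hW hL
      have hmem := (mem_cand v W L _).mp (headD_mem hne)
      rw [if_neg (by omega)]
  · have h1 : max 0 (L - W) = max 0 (L - W + 1) := by omega
    have hcand : cand v W L = (PySem.List.pyRange (max 0 (L - W + 1)) (L + 1) 1).filter (good v L) := by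
      unfold cand
      rfl
    rw [h1, ← hcand]
    have hne := cand_ne_nil v W L hW hL
    have hmem := (mem_cand v W L _).mp (headD_mem hne)
    rw [if_neg (by omega)]

theorem exists_cand_le (v : Int → Int) (W j : Int) :
    ∀ d : Nat, ∀ k, max 0 (j - W + 1) ≤ k → k ≤ j → (j - k).toNat ≤ d →
      ∃ k'' ∈ cand v W j, v k'' ≤ v k := by
  intro d
  induction d with
  | zero =>
    intro k h1 h2 h3
    have hkj : k = j := by omega
    subst hkj
    exact ⟨k, (mem_cand v W k k).mpr ⟨h1, le_refl _, good_self v k⟩, le_refl _⟩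
  | succ d ih =>
    intro k h1 h2 h3
    by_cases hg : good v j k = true
    · exact ⟨k, (mem_cand v W j k).mpr ⟨h1, h2, hg⟩, le_refl _⟩
    · have hex : ∃ k', k' ∈ PySem.List.pyRange (k + 1) (j + 1) 1 ∧ ¬ (v k < v k') := by
        by_contra hc
        apply hg
        unfold good
        rw [List.all_eq_true]
        intro k' hk'
        refine decide_eq_true ?_
        by_contra hlt
        exact hc ⟨k', hk', hlt⟩
      obtain ⟨k', hk'mem, hk'⟩ := hex
      rw [PySem.List.mem_pyRange_one] at hk'mem
      obtain ⟨k'', hk''c, hk''le⟩ := ih k' (by omega) (by omega) (by omega)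
      exact ⟨k'', hk''c, le_trans hk''le (not_lt.mp hk')⟩

theorem head_cand_min (v : Int → Int) (W j : Int) (hW : 1 ≤ W) (hj0 : 0 ≤ j) (hj : W - 1 ≤ j) :
    v ((cand v W j).headD 0) = minList ((PySem.List.pyRange (j - W + 1) (j + 1) 1).map v) := by
  have hne := cand_ne_nil v W j hW hj0
  obtain ⟨h0, rest, hc⟩ := List.exists_cons_of_ne_nil hne
  have hmemh0 : h0 ∈ cand v W j := by rw [hc]; exact List.mem_cons_self
  have hpw := pairwise_val_lt_cand v W j
  rw [hc, List.pairwise_cons] at hpw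
  have hminc : ∀ c ∈ cand v W j, v h0 ≤ v c := by
    intro c hcmem
    rw [hc] at hcmem
    rcases List.mem_cons.mp hcmem with rfl | hcm
    · exact le_refl _
    · exact le_of_lt (hpw.1 c hcm)
  rw [hc]
  simp only [List.headD_cons]
  symm
  apply minList_eq_of
  · have hb := (mem_cand v W j h0).mp hmemh0
    refine List.mem_map.mpr ⟨h0, ?_, rfl⟩
    rw [PySem.List.mem_pyRange_one]
    omega
  · intro y hy
    obtain ⟨k, hkmem, rfl⟩ := List.mem_map.mp hy
    rw [PySem.List.mem_pyRange_one] at hkmem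
    obtain ⟨k'', hk''c, hk''le⟩ :=
      exists_cand_le v W j (j - k).toNat k (by omega) (by omega) (le_refl _)
    exact le_trans (hminc k'' hk''c) hk''le

-- ---- the row pass: deque + in-place row writes, in closed form ----

theorem getD_set_int (l : List Int) (i j : Nat) (x : Int) :
    (l.set i x).getD j 0 = if i = j ∧ i < l.length then x else l.getD j 0 := by
  rw [List.getD_eq_getElem?_getD, List.getElem?_set, List.getD_eq_getElem?_getD]
  by_cases h1 : i = j
  · subst h1
    by_cases h2 : i < l.length
    · simp [h2]
    · simp [h2]
  · simp [h1]

theorem pySetIdx_nonneg (xs : List Int) (i v : Int) (hi : 0 ≤ i) :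
    pySetIdx xs i v = xs.set i.toNat v := by
  simp only [pySetIdx]
  rw [if_neg (not_lt.mpr hi)]

theorem rowPass_fold (a : Int → Int) (w : Int) (hw : 1 ≤ w) :
    ∀ L : Int, 0 ≤ L → ∀ row0 : List Int,
      ((PySem.List.pyRange 0 L 1).foldl
        (fun (st : List Int × List Int) j =>
          (dqStep a w j st.1,
           if w - 1 ≤ j then pySetIdx st.2 (j - w + 1) (a ((dqStep a w j st.1).headD 0))
           else st.2))
        ([], row0)).1 = cand a w (L - 1)
      ∧ ((PySem.List.pyRange 0 L 1).foldl
        (fun (st : List Int × List Int) j =>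
          (dqStep a w j st.1,
           if w - 1 ≤ j then pySetIdx st.2 (j - w + 1) (a ((dqStep a w j st.1).headD 0))
           else st.2))
        ([], row0)).2.length = row0.length
      ∧ ∀ p : Nat, p < row0.length →
        ((PySem.List.pyRange 0 L 1).foldl
          (fun (st : List Int × List Int) j =>
            (dqStep a w j st.1,
             if w - 1 ≤ j then pySetIdx st.2 (j - w + 1) (a ((dqStep a w j st.1).headD 0))
             else st.2))
          ([], row0)).2.getD p 0
        = if (p : Int) ≤ L - w
          then minList ((PySem.List.pyRange (p : Int) ((p : Int) + w) 1).map a)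
          else row0.getD p 0 := by
  intro L hL
  induction L, hL using Int.le_induction with
  | base =>
    intro row0
    rw [PySem.List.pyRange_one_eq_nil (le_refl 0)]
    refine ⟨?_, rfl, ?_⟩
    · unfold cand
      rw [PySem.List.pyRange_one_eq_nil
        (show (0 : Int) - 1 + 1 ≤ max 0 (0 - 1 - w + 1) from by omega)]
      rfl
    · intro p hp
      rw [if_neg (by omega)]
      rfl
  | succ L hL ih =>
    intro row0
    obtain ⟨ih1, ih2, ih3⟩ := ih row0
    rw [PySem.List.pyRange_one_succ_right hL, List.foldl_append,
      show L + 1 - 1 = L from by ring]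
    simp only [List.foldl]
    rw [ih1, dqStep_cand a w L hw hL]
    refine ⟨rfl, ?_, ?_⟩
    · by_cases hc : w - 1 ≤ L
      · rw [if_pos hc, pySetIdx_nonneg _ _ _ (by omega), List.length_set]
        exact ih2
      · rw [if_neg hc]; exact ih2
    · intro p hp
      by_cases hc : w - 1 ≤ L
      · rw [if_pos hc, pySetIdx_nonneg _ _ _ (by omega), getD_set_int]
        by_cases hpe : (L - w + 1).toNat = p
        · rw [if_pos ⟨hpe, by rw [ih2]; exact hpe ▸ hp⟩,
            if_pos (show (p : Int) ≤ L + 1 - w from by omega)]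
          have hpcast : (p : Int) = L - w + 1 := by omega
          rw [hpcast, head_cand_min a w L hw hL hc,
            show L - w + 1 + w = L + 1 from by ring]
        · rw [if_neg (fun hcon => hpe hcon.1), ih3 p hp]
          by_cases hple : (p : Int) ≤ L - w
          · rw [if_pos hple, if_pos (by omega)]
          · rw [if_neg hple, if_neg (by omega)]
      · rw [if_neg hc, ih3 p hp, if_neg (by omega), if_neg (by omega)]

-- ---- the column pass: deque + running best, in closed form ----

theorem colPass_fold (v : Int → Int) (h : Int) (hh : 1 ≤ h) (j : Int) :
    ∀ M : Int, 0 ≤ M → ∀ st0 : Int × List Int,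
      ((PySem.List.pyRange 0 M 1).foldl
        (fun (st2 : List Int × Int × List Int) i =>
          if h - 1 ≤ i
          then (dqStep v h i st2.1, upd st2.2 (v ((dqStep v h i st2.1).headD 0)) (i - h + 1) j)
          else (dqStep v h i st2.1, st2.2))
        ([], st0))
      = (cand v h (M - 1),
         (PySem.List.pyRange 0 (M - h + 1) 1).foldl
           (fun st top => upd st (minList ((PySem.List.pyRange top (top + h) 1).map v)) top j)
           st0) := by
  intro M hM
  induction M, hM using Int.le_induction with
  | base =>
    intro st0
    rw [PySem.List.pyRange_one_eq_nil (le_refl 0),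
      PySem.List.pyRange_one_eq_nil (show (0 : Int) - h + 1 ≤ 0 from by omega)]
    unfold cand
    rw [PySem.List.pyRange_one_eq_nil
      (show (0 : Int) - 1 + 1 ≤ max 0 (0 - 1 - h + 1) from by omega)]
    rfl
  | succ M hM ih =>
    intro st0
    rw [PySem.List.pyRange_one_succ_right hM, List.foldl_append,
      show M + 1 - 1 = M from by ring, ih st0]
    simp only [List.foldl]
    rw [dqStep_cand v h M hh hM]
    by_cases hc : h - 1 ≤ M
    · rw [if_pos hc,
        show M + 1 - h + 1 = (M - h + 1) + 1 from by ring,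
        PySem.List.pyRange_one_succ_right (show (0 : Int) ≤ M - h + 1 from by omega),
        List.foldl_append]
      simp only [List.foldl]
      rw [head_cand_min v h M hh hM hc,
        show M - h + 1 + h = M + 1 from by ring]
    · rw [if_neg hc,
        PySem.List.pyRange_one_eq_nil (show M + 1 - h + 1 ≤ 0 from by omega),
        PySem.List.pyRange_one_eq_nil (show M - h + 1 ≤ 0 from by omega)]

-- ---- assembling the two programs ----

-- A's per-row pass as a named function (definitionally equal to the rowPass inside `solution`)
def rowMinOf (g : List (List Int)) (n w : Int) (i : Int) : List Int :=
  ((PySem.List.pyRange 0 n 1).foldl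
    (fun (st : List Int × List Int) j' =>
      (dqStep (fun k => cell g i k) w j' st.1,
       if w - 1 ≤ j' then
         pySetIdx st.2 (j' - w + 1)
           (cell g i ((dqStep (fun k => cell g i k) w j' st.1).headD 0))
       else st.2))
    ([], (PySem.List.pyRange 0 (n - w + 1) 1).map (fun _ => 0))).2

theorem cell_rowMinOf (g : List (List Int)) (m n w : Int) (hw : 1 ≤ w) (hn : 0 ≤ n)
    (i j : Int) (hi0 : 0 ≤ i) (him : i < m) (hj0 : 0 ≤ j) (hjn : j < n - w + 1) :
    cell ((PySem.List.pyRange 0 m 1).map (rowMinOf g n w)) i j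
      = minList ((PySem.List.pyRange j (j + w) 1).map (fun k => cell g i k)) := by
  unfold cell
  rw [PySem.List.pyRange_one, List.map_map,
    PySem.List.getD_map_range _ _ _ _ (show i.toNat < (m - 0).toNat from by omega)]
  simp only [Function.comp]
  rw [show (0 : Int) + (i.toNat : Int) = i from by omega]
  have h3 : (rowMinOf g n w i).getD j.toNat 0
      = if ((j.toNat : Int)) ≤ n - w
        then minList ((PySem.List.pyRange (j.toNat : Int) ((j.toNat : Int) + w) 1).map
          (fun k => cell g i k))
        else ((PySem.List.pyRange 0 (n - w + 1) 1).map (fun _ => (0 : Int))).getD j.toNat 0 :=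
    (rowPass_fold (fun k => cell g i k) w hw n hn _).2.2 j.toNat
      (by rw [List.length_map, PySem.List.length_pyRange_one]; omega)
  rw [h3, if_pos (by omega), Int.toNat_of_nonneg hj0]
  rfl

theorem inner_eq (g : List (List Int)) (m n h_ w : Int)
    (hm : 0 ≤ m) (hn : 0 ≤ n) (hh : 1 ≤ h_) (hw : 1 ≤ w)
    (j : Int) (hj0 : 0 ≤ j) (hjn : j < n - w + 1) (st : Int × List Int) :
    ((PySem.List.pyRange 0 m 1).foldl
      (fun (st2 : List Int × Int × List Int) i =>
        let dq := dqStep (fun i' => cell ((PySem.List.pyRange 0 m 1).map (rowMinOf g n w)) i' j) h_ i st2.1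
        if h_ - 1 ≤ i
        then (dq, upd st2.2 (cell ((PySem.List.pyRange 0 m 1).map (rowMinOf g n w)) (dq.headD 0) j) (i - h_ + 1) j)
        else (dq, st2.2))
      ([], st)).2
    = (PySem.List.pyRange 0 (m - h_ + 1) 1).foldl
        (fun st2 top => upd st2 (minList ((PySem.List.pyRange top (top + h_) 1).flatMap
          (fun i => (PySem.List.pyRange j (j + w) 1).map (fun k => cell g i k)))) top j) st := by
  have h := colPass_fold (fun i' => cell ((PySem.List.pyRange 0 m 1).map (rowMinOf g n w)) i' j)
    h_ hh j m hm st
  refine Eq.trans (congrArg (fun (p : List Int × (Int × List Int)) => p.2) h) ?_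
  show (PySem.List.pyRange 0 (m - h_ + 1) 1).foldl
      (fun st2 top => upd st2 (minList ((PySem.List.pyRange top (top + h_) 1).map
        (fun i' => cell ((PySem.List.pyRange 0 m 1).map (rowMinOf g n w)) i' j))) top j) st = _
  refine PySem.List.foldl_congr_mem _ _ _ _ ?_
  intro st2 top htop
  rw [PySem.List.mem_pyRange_one] at htop
  have houter : PySem.List.pyRange top (top + h_) 1 ≠ [] :=
    List.ne_nil_of_mem (PySem.List.mem_pyRange_one.mpr ⟨le_refl _, by omega⟩)
  have hinner : ∀ i ∈ PySem.List.pyRange top (top + h_) 1,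
      (PySem.List.pyRange j (j + w) 1).map (fun k => cell g i k) ≠ [] := by
    intro i _
    exact fun hc => (List.ne_nil_of_mem
      (List.mem_map.mpr ⟨j, PySem.List.mem_pyRange_one.mpr ⟨le_refl _, by omega⟩, rfl⟩)) hc
  have hV : minList ((PySem.List.pyRange top (top + h_) 1).map
        (fun i' => cell ((PySem.List.pyRange 0 m 1).map (rowMinOf g n w)) i' j))
      = minList ((PySem.List.pyRange top (top + h_) 1).flatMap
        (fun i => (PySem.List.pyRange j (j + w) 1).map (fun k => cell g i k))) := by
    rw [minList_flatMap _ _ houter hinner]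
    congr 1
    apply List.map_congr_left
    intro i hi
    rw [PySem.List.mem_pyRange_one] at hi
    exact cell_rowMinOf g m n w hw hn i j (by omega) (by omega) hj0 hjn
  exact congrArg (fun V => upd st2 V top j) hV

theorem solution_unfold (m n h_ w : Int) (drops : List (List Int)) :
    solution m n h_ w drops
    = ((PySem.List.pyRange 0 (n - w + 1) 1).foldl
        (fun (st : Int × List Int) j =>
          ((PySem.List.pyRange 0 m 1).foldl
            (fun (st2 : List Int × Int × List Int) i =>
              let dq := dqStep (fun i' => cell ((PySem.List.pyRange 0 m 1).map
                (rowMinOf (buildRains m n drops) n w)) i' j) h_ i st2.1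
              if h_ - 1 ≤ i
              then (dq, upd st2.2 (cell ((PySem.List.pyRange 0 m 1).map
                (rowMinOf (buildRains m n drops) n w)) (dq.headD 0) j) (i - h_ + 1) j)
              else (dq, st2.2))
            ([], st)).2)
        (-1, [1000000000, 1000000000])).2 := rfl

theorem solution_alt_unfold (m n h_ w : Int) (drops : List (List Int)) :
    solution_alt m n h_ w drops
    = ((PySem.List.pyRange 0 (n - w + 1) 1).foldl
        (fun (st : Int × List Int) j =>
          (PySem.List.pyRange 0 (m - h_ + 1) 1).foldl
            (fun st2 top => upd st2 (minList ((PySem.List.pyRange top (top + h_) 1).flatMap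
              (fun i => (PySem.List.pyRange j (j + w) 1).map
                (fun k => cell (buildRains m n drops) i k)))) top j) st)
        (-1, [1000000000, 1000000000])).2 := rfl

-- ===== VERDICT (by name: the statement is the Claim_ definition above) =====
theorem solution_spec : Claim_equal_solution := by
  unfold Claim_equal_solution
  intro m n h_ w drops _ hpre
  obtain ⟨-, hcase⟩ := hpre
  unfold Spec_solution
  rw [solution_unfold, solution_alt_unfold]
  rcases hcase with ⟨hm, hn, hh, hw⟩ | ⟨hm2, hh⟩ | ⟨hnw, hw⟩
  · refine congrArg (fun (p : Int × List Int) => p.2) (PySem.List.foldl_congr_mem _ _ _ _ ?_)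
    intro st j hjmem
    rw [PySem.List.mem_pyRange_one] at hjmem
    exact inner_eq (buildRains m n drops) m n h_ w hm hn hh hw j hjmem.1 hjmem.2 st
  · -- m ≤ 0 and m < h_: no row is ever visited on either side; both folds keep the default
    simp only [PySem.List.pyRange_one_eq_nil (show m ≤ (0 : Int) from hm2),
      PySem.List.pyRange_one_eq_nil (show m - h_ + 1 ≤ (0 : Int) from by omega),
      List.foldl_nil]
  · -- n < w and 1 ≤ w: there is no window column; both outer loops are empty
    rw [PySem.List.pyRange_one_eq_nil (show n - w + 1 ≤ (0 : Int) from by omega)]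
    rfl
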